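-- pv_equiv track=rewrite | github.com/avivajpeyi/deep_gw_pe_followup | deep_gw_pe_followup/flat_xeff_prior/ias_code.py | merge_dictionaries_safely
-- ===== SOURCE A (Python) =====
-- def merge_dictionaries_safely(dics):
--     """
--     Merge multiple dictionaries into one.
--     Accept repeated keys if values are consistent, otherwise raise
--     `ValueError`.
--     """
--     merged = {}
--     for dic in dics:
--         for key in merged.keys() & dic.keys():
--             if merged[key] != dic[key]:
--                 raise ValueError(f'Found incompatible values for {key}')
--         merged |= dic
--     return merged
-- ===== SOURCE B (Python) =====
-- def merge_dictionaries_safely(dics):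
--     """
--     Merge multiple dictionaries into one.
--     Accept repeated keys if values are consistent, otherwise raise
--     `ValueError`.
--     """
--     # Stage 1: group every value under its key (a multimap), never merging.
--     values_by_key = {}
--     for dic in dics:
--         for key, value in dic.items():
--             values_by_key.setdefault(key, []).append(value)
--     # Stage 2: validate each key's collected values.
--     for key, values in values_by_key.items():
--         if any(v != values[0] for v in values):
--             raise ValueError(f'Found incompatible values for {key}')
--     # Stage 3: project the multimap down to one value per key.
--     return {key: values[0] for key, values in values_by_key.items()}
-- ===== Notes on version B (the rewrite author's own statement) =====
-- stated objective: alternative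
-- what changed: Replaced A's incremental merge (per-dict key-set-intersection conflict scan, then |= overwrite) by a three-stage pipeline: build a multimap key->list of all values, then validate each key's value list, then project the multimap to its first value per key; no merged dict is maintained during traversal.
import Mathlib
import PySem

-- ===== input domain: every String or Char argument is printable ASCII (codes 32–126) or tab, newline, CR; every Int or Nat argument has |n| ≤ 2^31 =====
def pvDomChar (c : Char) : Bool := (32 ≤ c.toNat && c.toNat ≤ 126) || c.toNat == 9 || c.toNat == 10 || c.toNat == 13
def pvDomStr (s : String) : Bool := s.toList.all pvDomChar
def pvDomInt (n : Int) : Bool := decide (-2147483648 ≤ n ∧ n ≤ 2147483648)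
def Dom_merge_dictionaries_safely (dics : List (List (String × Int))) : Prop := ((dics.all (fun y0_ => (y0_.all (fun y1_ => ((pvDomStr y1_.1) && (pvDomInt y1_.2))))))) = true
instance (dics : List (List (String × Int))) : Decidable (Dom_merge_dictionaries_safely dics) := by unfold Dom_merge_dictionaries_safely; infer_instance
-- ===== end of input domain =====

-- ===== PORT A =====
-- B replaces A's incremental merge by a grouping pipeline (multimap, validate, project);
-- equality of the RETURN value is claimed on consistent inputs (Pre_); on inconsistent
-- inputs both Pythons raise ValueError (those inputs are outside Pre_).
-- A: merged = {}; for dic: (raise if a shared key disagrees — excluded by Pre_); merged |= dic.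
def merge_dictionaries_safely (dics : List (List (String × Int))) : List (String × Int) :=
  (dics.foldl (fun merged dic => merged.update dic) (PySem.Dict.empty : PySem.Dict String Int)).items

-- ===== PORT B =====
-- B stage 1: values_by_key.setdefault(key, []).append(value) = d[k] = d.get(k, []) + [v] = Dict.modify;
-- stage 2 only raises (excluded by Pre_), it computes nothing on admitted inputs;
-- stage 3: {key: values[0] ...} — values[0] via pyGet?; the lists are nonempty by construction,
-- so the .getD 0 default is never used on admitted inputs.
def merge_dictionaries_safely_alt (dics : List (List (String × Int))) : List (String × Int) :=
  let vbk : PySem.Dict String (List Int) :=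
    dics.foldl (fun d dic =>
      dic.foldl (fun d kv => d.modify kv.1 [] (fun l => l ++ [kv.2])) d)
      PySem.Dict.empty
  vbk.items.map (fun kl => (kl.1, (PySem.List.pyGet? kl.2 0).getD 0))

-- ===== PRECONDITION & SPEC =====
-- Pre_ holds exactly when all given key/value pairs are mutually consistent (no key carries two
-- different values anywhere in the input); on the excluded inputs the Python A raises ValueError.
def Pre_merge_dictionaries_safely (dics : List (List (String × Int))) : Prop :=
  ∀ d1 ∈ dics, ∀ d2 ∈ dics, ∀ p ∈ d1, ∀ q ∈ d2, p.1 = q.1 → p.2 = q.2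

instance (dics : List (List (String × Int))) : Decidable (Pre_merge_dictionaries_safely dics) := by
  unfold Pre_merge_dictionaries_safely; infer_instance

def pvWitness_merge_dictionaries_safely : (List (List (String × Int))) :=
  [[("a", 1)], [("a", 1), ("b", 2)]]

def Spec_merge_dictionaries_safely (dics : List (List (String × Int))) (out : List (String × Int)) : Prop := out = merge_dictionaries_safely_alt dics
instance (dics : List (List (String × Int))) (out : List (String × Int)) : Decidable (Spec_merge_dictionaries_safely dics out) := by unfold Spec_merge_dictionaries_safely; infer_instance

-- ===== CLAIM (what is proved, stated in full; the proofs are below) =====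
def Claim_equal_merge_dictionaries_safely : Prop := ∀ (dics : List (List (String × Int))), Dom_merge_dictionaries_safely dics → Pre_merge_dictionaries_safely dics → Spec_merge_dictionaries_safely dics (merge_dictionaries_safely dics)

-- ===== LEMMAS AND PROOFS =====

-- A's overwrite fold looks up to the LAST value stored under a key.
lemma foldl_insert_getD (l : List (String × Int)) (d : PySem.Dict String Int) (k : String) :
    (l.foldl (fun m p => m.insert p.1 p.2) d).getD k 0 =
      ((l.filter (fun p => p.1 == k)).map (·.2)).getLastD (d.getD k 0) := by
  induction l generalizing d with
  | nil => rfl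
  | cons a t ih =>
    simp only [List.foldl_cons, List.filter_cons]
    by_cases h : a.1 = k
    · subst h
      simp only [BEq.rfl, if_pos, List.map_cons, List.getLastD_cons,
        ih (d.insert a.1 a.2), PySem.Dict.getD_insert_self]
    · have hb : (a.1 == k) = false := by simp [h]
      rw [hb]
      have hg : (d.insert a.1 a.2).getD k 0 = d.getD k 0 :=
        PySem.Dict.getD_insert_of_ne d a.2 0 (fun hk => h hk.symm)
      simp only [Bool.false_eq_true, if_false, ih (d.insert a.1 a.2), hg]

-- On a nonempty constant list, last and first coincide.
lemma getLastD_head_of_const (xs : List Int) (v d1 d2 : Int) (hne : xs ≠ [])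
    (hall : ∀ w ∈ xs, w = v) :
    xs.getLastD d1 = v ∧ (PySem.List.pyGet? xs 0).getD d2 = v := by
  cases xs with
  | nil => exact absurd rfl hne
  | cons a t =>
    constructor
    · induction t generalizing a with
      | nil => exact hall a (by simp)
      | cons b u ih2 =>
        rw [List.getLastD_cons]
        exact ih2 b (by simp) (fun w hw => hall w (List.mem_cons_of_mem _ hw))
    · have : PySem.List.pyGet? (a :: t) 0 = some a := by
        simp [PySem.List.pyGet?, PySem.List.pyIdx?]
      rw [this]
      exact hall a List.mem_cons_self

-- ===== VERDICT (by name: the statement is the Claim_ definition above) =====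
theorem merge_dictionaries_safely_spec : Claim_equal_merge_dictionaries_safely := by
  intro dics _ hpre
  unfold Spec_merge_dictionaries_safely merge_dictionaries_safely merge_dictionaries_safely_alt
  -- both ports are folds over the flattened item list
  have hA : dics.foldl (fun merged dic => merged.update dic) PySem.Dict.empty
      = dics.flatten.foldl (fun m (p : String × Int) => m.insert p.1 p.2) PySem.Dict.empty := by
    rw [List.foldl_flatten]; rfl
  have hB : dics.foldl (fun d dic => dic.foldl (fun d (kv : String × Int) => d.modify kv.1 [] (fun l => l ++ [kv.2])) d) PySem.Dict.empty
      = dics.flatten.foldl (fun d (p : String × Int) => d.modify p.1 [] (fun l => l ++ [p.2])) PySem.Dict.empty := by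
    rw [List.foldl_flatten]
  simp only [hA, hB]
  set L := dics.flatten with hL
  have hcons : ∀ p ∈ L, ∀ q ∈ L, p.1 = q.1 → p.2 = q.2 := by
    intro p hp q hq
    rcases List.mem_flatten.mp hp with ⟨d1, hd1, hp1⟩
    rcases List.mem_flatten.mp hq with ⟨d2, hd2, hq2⟩
    exact hpre d1 hd1 d2 hd2 p hp1 q hq2
  set dA := L.foldl (fun m (p : String × Int) => m.insert p.1 p.2) PySem.Dict.empty with hdA
  set dB := L.foldl (fun d (p : String × Int) => d.modify p.1 [] (fun l => l ++ [p.2])) PySem.Dict.empty with hdB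
  have hkA : dA.keys = PySem.Set.update (PySem.Dict.empty : PySem.Dict String Int).keys (L.map (·.1)) :=
    PySem.Dict.keys_foldl_insert_key L (·.1) (fun _ p => p.2) _
  have hkB : dB.keys = PySem.Set.update (PySem.Dict.empty : PySem.Dict String (List Int)).keys (L.map (·.1)) :=
    PySem.Dict.keys_foldl_modify_key L (·.1) [] (fun _ p l => l ++ [p.2]) _
  have hndA : dA.keys.Nodup :=
    PySem.Dict.nodup_keys_foldl_insert_key L (·.1) (fun _ p => p.2) _ PySem.Dict.nodup_keys_empty
  have hndB : dB.keys.Nodup :=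
    PySem.Dict.nodup_keys_foldl_modify_key L (·.1) [] (fun _ p l => l ++ [p.2]) _ PySem.Dict.nodup_keys_empty
  rw [PySem.Dict.items_eq_map_keys dA hndA 0, PySem.Dict.items_eq_map_keys dB hndB [],
    List.map_map, hkA, hkB]
  apply List.map_congr_left
  intro k hk
  simp only [Function.comp]
  congr 1
  -- k occurs in L
  have hkmem : k ∈ L.map (·.1) := (PySem.Set.mem_ofList (L.map (·.1)) k).mp (show k ∈ PySem.Set.ofList (L.map (·.1)) from hk)
  rcases List.mem_map.mp hkmem with ⟨p, hpL, hpk⟩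
  -- the collected value list for k
  have hvB : dB.getD k [] = (L.filter (fun q => q.1 == k)).map (·.2) := by
    rw [hdB, PySem.Dict.getD_foldl_modify_append, PySem.Dict.getD_empty]
    simp
  have hvA : dA.getD k 0 = ((L.filter (fun q => q.1 == k)).map (·.2)).getLastD 0 := by
    rw [hdA, foldl_insert_getD, PySem.Dict.getD_empty]
  have hne : (L.filter (fun q => q.1 == k)).map (·.2) ≠ [] := by
    have : p ∈ L.filter (fun q => q.1 == k) := by
      rw [List.mem_filter]; exact ⟨hpL, by simp [hpk]⟩
    intro hnil
    exact absurd (List.mem_map_of_mem this) (by rw [hnil]; exact List.not_mem_nil)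
  have hall : ∀ w ∈ (L.filter (fun q => q.1 == k)).map (·.2), w = p.2 := by
    intro w hw
    rcases List.mem_map.mp hw with ⟨q, hq, hwq⟩
    rw [List.mem_filter] at hq
    rw [← hwq]
    exact hcons q hq.1 p hpL (by have := of_decide_eq_true hq.2; simpa [hpk] using this)
  obtain ⟨h1, h2⟩ := getLastD_head_of_const _ p.2 0 0 hne hall
  rw [hvA, hvB, h1, h2]
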